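-- pv_equiv track=rewrite | github.com/tayomoore/AoC | day2/main.py | isChanging
-- ===== SOURCE A (Python) =====
-- import collections
--
-- def isChanging(levels):
--     # is it in order? if not, then it can't be ok, so return early
--     if not(levels == sorted(levels) or levels == sorted(levels, reverse=True)):
--         return False
--     # otherwise check to see there's no duplicates
--     else:
--         counts = collections.Counter(levels)
--         for count in counts.values():
--             if count > 1:
--                 return False
--         return True
-- ===== SOURCE B (Python) =====
-- def isChanging(levels):
--     pairs = list(zip(levels, levels[1:]))
--     return all(a < b for a, b in pairs) or all(a > b for a, b in pairs)
-- ===== Notes on version B (the rewrite author's own statement) =====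
-- stated objective: faster
-- what changed: Replaces the sort-twice comparison plus a Counter duplicate scan with a single pass over adjacent pairs checking strict increase or strict decrease.
import Mathlib
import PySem

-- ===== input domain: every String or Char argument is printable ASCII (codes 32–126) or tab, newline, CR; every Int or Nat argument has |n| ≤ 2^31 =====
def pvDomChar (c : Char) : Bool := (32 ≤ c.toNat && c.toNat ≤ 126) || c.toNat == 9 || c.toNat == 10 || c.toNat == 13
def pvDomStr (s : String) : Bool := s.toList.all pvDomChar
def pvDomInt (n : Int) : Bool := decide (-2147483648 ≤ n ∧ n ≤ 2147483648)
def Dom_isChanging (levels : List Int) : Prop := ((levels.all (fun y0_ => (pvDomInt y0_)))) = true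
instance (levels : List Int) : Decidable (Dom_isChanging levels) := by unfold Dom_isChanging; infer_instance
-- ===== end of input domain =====

-- B replaces A's sort-twice comparison plus Counter duplicate scan with a single pass
-- over adjacent pairs checking strict monotonicity (objective: faster, asymptotic).


-- ===== PORT A =====
-- 'for count in counts.values(): if count > 1: return False / return True'
def isChangingCountLoop : List Int → Bool
  | [] => true
  | c :: rest => if c > 1 then false else isChangingCountLoop rest

def isChanging (levels : List Int) : Bool :=
  if !(decide (levels = PySem.List.sorted levels (fun x => x) false) ||
       decide (levels = PySem.List.sorted levels (fun x => x) true)) then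
    false
  else
    let counts := PySem.Dict.counter levels
    isChangingCountLoop counts.values

-- ===== PORT B =====
def isChanging_alt (levels : List Int) : Bool :=
  let pairs := levels.zip (PySem.List.slice levels (some 1) none)
  (pairs.all fun p => p.1 < p.2) || (pairs.all fun p => p.1 > p.2)

-- ===== PRECONDITION & SPEC =====
def Spec_isChanging (levels : List Int) (out : Bool) : Prop := out = isChanging_alt levels
instance (levels : List Int) (out : Bool) : Decidable (Spec_isChanging levels out) := by unfold Spec_isChanging; infer_instance

-- ===== CLAIM (what is proved, stated in full; the proofs are below) =====
def Claim_equal_isChanging : Prop := ∀ (levels : List Int), Dom_isChanging levels → Spec_isChanging levels (isChanging levels)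

-- ===== LEMMAS AND PROOFS =====

theorem countLoop_true_iff (cs : List Int) :
    isChangingCountLoop cs = true ↔ ∀ c ∈ cs, ¬ c > 1 := by
  induction cs with
  | nil => simp [isChangingCountLoop]
  | cons c rest ih =>
    simp only [isChangingCountLoop]
    by_cases h : c > 1
    · simp only [h, if_true]
      constructor
      · intro hf; exact absurd hf (by simp)
      · intro hr; exact absurd h (hr c (List.mem_cons.mpr (Or.inl rfl)))
    · simp only [h, if_false, ih]
      constructor
      · intro hr x hx
        rcases List.mem_cons.mp hx with rfl | hx
        · exact h
        · exact hr x hx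
      · intro hr x hx; exact hr x (List.mem_cons.mpr (Or.inr hx))

theorem counts_ok_iff_nodup (levels : List Int) :
    isChangingCountLoop (PySem.Dict.counter levels).values = true ↔ levels.Nodup := by
  rw [countLoop_true_iff, List.nodup_iff_count_le_one]
  have hv : (PySem.Dict.counter levels).values
      = ((PySem.Set.ofList levels).map (fun k => (levels.count k : Int))) := by
    show ((PySem.Dict.counter levels).items).map (·.2) = _
    rw [PySem.Dict.items_counter]; simp
  rw [hv]
  constructor
  · intro h a
    by_cases ha : a ∈ levels
    · have := h (levels.count a : Int) (by
        simp only [List.mem_map]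
        exact ⟨a, by rw [PySem.Set.mem_ofList]; exact ha, rfl⟩)
      omega
    · simp [List.count_eq_zero_of_not_mem ha]
  · intro h c hc
    simp only [List.mem_map] at hc
    obtain ⟨a, _, rfl⟩ := hc
    have := h a; omega

theorem sorted_asc_iff (levels : List Int) :
    levels = PySem.List.sorted levels (fun x => x) false ↔ levels.Pairwise (· ≤ ·) := by
  constructor
  · intro h
    have := PySem.List.sorted_pairwise levels (fun x => x) ; rw [← h] at this
    exact this
  · intro h; exact (PySem.List.sorted_eq_self_of_pairwise levels (fun x => x) h).symm

theorem sorted_desc_iff (levels : List Int) :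
    levels = PySem.List.sorted levels (fun x => x) true ↔ levels.Pairwise (fun a b => b ≤ a) := by
  constructor
  · intro h
    have := PySem.List.sorted_pairwise_rev levels (fun x => x) ; rw [← h] at this
    exact this
  · intro h; exact (PySem.List.sorted_rev_eq_self_of_pairwise levels (fun x => x) h).symm

theorem a_true_iff (levels : List Int) :
    isChanging levels = true ↔ levels.Pairwise (· < ·) ∨ levels.Pairwise (· > ·) := by
  unfold isChanging
  by_cases hs : levels = PySem.List.sorted levels (fun x => x) false ∨
                levels = PySem.List.sorted levels (fun x => x) true
  · have hsb : (decide (levels = PySem.List.sorted levels (fun x => x) false) ||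
        decide (levels = PySem.List.sorted levels (fun x => x) true)) = true := by
      rcases hs with h | h
      · rw [decide_eq_true h]; rfl
      · rw [decide_eq_true h, Bool.or_true]
    rw [hsb]
    simp only [Bool.not_true, Bool.false_eq_true, if_false]
    rw [counts_ok_iff_nodup]
    constructor
    · intro hnd
      rcases hs with h | h
      · left
        have hle := (sorted_asc_iff levels).mp h
        have := List.Pairwise.and hle (List.nodup_iff_pairwise_ne.mp hnd)
        exact this.imp (fun ⟨h1, h2⟩ => lt_of_le_of_ne h1 h2)
      · right
        have hge := (sorted_desc_iff levels).mp h
        have := List.Pairwise.and hge (List.nodup_iff_pairwise_ne.mp hnd)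
        exact this.imp (fun ⟨h1, h2⟩ => lt_of_le_of_ne h1 (Ne.symm h2))
    · intro h
      rcases h with h | h
      · exact List.nodup_iff_pairwise_ne.mpr (h.imp (fun hlt => ne_of_lt hlt))
      · exact List.nodup_iff_pairwise_ne.mpr (h.imp (fun hlt => ne_of_gt hlt))
  · rw [not_or] at hs
    obtain ⟨h1, h2⟩ := hs
    simp only [h1, h2, decide_false, Bool.or_false, Bool.not_false, if_true]
    constructor
    · intro h; exact absurd h (by simp)
    · intro h
      exfalso
      rcases h with h | h
      · exact h1 ((sorted_asc_iff levels).mpr (h.imp le_of_lt))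
      · exact h2 ((sorted_desc_iff levels).mpr (h.imp (fun hab => le_of_lt hab)))

theorem zip_tail_all_iff (levels : List Int) (r : Int → Int → Prop) [DecidableRel r]
    (htrans : ∀ a b c, r a b → r b c → r a c) :
    ((levels.zip levels.tail).all fun p => decide (r p.1 p.2)) = true ↔ levels.Pairwise r := by
  induction levels with
  | nil => simp
  | cons a rest ih =>
    cases rest with
    | nil => simp
    | cons b t =>
      simp only [List.tail_cons, List.zip_cons_cons, List.all_cons, Bool.and_eq_true,
        decide_eq_true_eq] at ih ⊢
      rw [ih]
      constructor
      · rintro ⟨hab, hp⟩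
        refine List.pairwise_cons.mpr ⟨?_, hp⟩
        intro x hx
        rcases List.mem_cons.mp hx with rfl | hx
        · exact hab
        · exact htrans a b x hab (List.rel_of_pairwise_cons hp hx)
      · intro hpp
        obtain ⟨ha, hp⟩ := List.pairwise_cons.mp hpp
        exact ⟨ha b (by simp), hp⟩

theorem b_true_iff (levels : List Int) :
    isChanging_alt levels = true ↔ levels.Pairwise (· < ·) ∨ levels.Pairwise (· > ·) := by
  unfold isChanging_alt
  simp only [PySem.List.slice_from_one, Bool.or_eq_true]
  rw [show ((levels.zip levels.tail).all fun p => p.1 < p.2)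
      = ((levels.zip levels.tail).all fun p => decide (p.1 < p.2)) from rfl,
    show ((levels.zip levels.tail).all fun p => p.1 > p.2)
      = ((levels.zip levels.tail).all fun p => decide (p.1 > p.2)) from rfl]
  rw [zip_tail_all_iff levels (· < ·) (fun _ _ _ h1 h2 => lt_trans h1 h2),
    zip_tail_all_iff levels (· > ·) (fun _ _ _ h1 h2 => lt_trans h2 h1)]

-- ===== VERDICT (by name: the statement is the Claim_ definition above) =====
theorem isChanging_spec : Claim_equal_isChanging := by
  intro levels _
  unfold Spec_isChanging
  cases hA : isChanging levels with
  | true => exact ((b_true_iff levels).mpr ((a_true_iff levels).mp hA)).symm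
  | false =>
    cases hB : isChanging_alt levels with
    | false => rfl
    | true =>
      have := (a_true_iff levels).mpr ((b_true_iff levels).mp hB)
      rw [hA] at this; exact absurd this (by simp)
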